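-- pv_equiv track=rewrite | github.com/dmshirochenko/algorithmic_trainings | yandex_algo_training/Final/A. Объединение последовательностей.py | merging_lists
-- ===== SOURCE A (Python) =====
-- def merging_lists(n):
--     merged_list = []
--     square_index, cube_index = 0, 0
--     square, cube = 0, 0
--
--     while square_index < n or cube_index < n:
--         if cube_index == n or (square_index < n and square <= cube):
--             if merged_list and merged_list[-1] == square:
--                 pass
--             else:
--                 merged_list.append(square)
--             square_index += 1
--             square = square_index * square_index
--         else:
--             if merged_list and merged_list[-1] == cube:
--                 pass
--             else:
--                 merged_list.append(cube)
--             cube_index += 1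
--             cube = cube_index * cube_index * cube_index
--
--         if len(merged_list) == n + 1:
--             break
--     return merged_list
--
--     return merged_list
-- ===== SOURCE B (Python) =====
-- def merging_lists(n):
--     values = set()
--     for i in range(n):
--         values.add(i * i)
--         values.add(i * i * i)
--     return sorted(values)[:n + 1]
-- ===== Notes on version B (the rewrite author's own statement) =====
-- stated objective: simpler
-- what changed: Replaces the two-pointer merge of the square and cube streams with adjacent-dedup and an early break by collecting all squares and cubes of indices below n into a set, sorting it, and slicing off the required prefix.
import Mathlib
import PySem

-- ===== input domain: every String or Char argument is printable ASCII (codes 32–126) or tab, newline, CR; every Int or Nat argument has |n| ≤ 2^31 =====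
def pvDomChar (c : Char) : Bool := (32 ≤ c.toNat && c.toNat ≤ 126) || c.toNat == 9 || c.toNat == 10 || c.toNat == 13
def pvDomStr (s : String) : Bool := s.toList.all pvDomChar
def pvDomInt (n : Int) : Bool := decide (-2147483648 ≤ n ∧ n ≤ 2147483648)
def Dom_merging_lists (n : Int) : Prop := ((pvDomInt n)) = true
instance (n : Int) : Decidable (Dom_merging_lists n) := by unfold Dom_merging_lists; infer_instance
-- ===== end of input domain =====

-- B replaces A's two-pointer merge-with-dedup-and-break by "collect squares and cubes into a set, sort, slice": simpler.

-- ===== PORT A =====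
-- while loop of A as structural recursion; state = (merged_list, square_index, cube_index, square, cube)
-- fuel bounds the number of iterations only (each iteration advances a pointer, so
-- (n - si).toNat + (n - ci).toNat iterations suffice); it never cuts a real run short
def mergeLoop (fuel : Nat) (n : Int) (merged : List Int) (si ci sq cb : Int) : List Int :=
  match fuel with
  | 0 => merged
  | fuel + 1 =>
    if si < n ∨ ci < n then
      if ci = n ∨ (si < n ∧ sq ≤ cb) then
        let merged' := if merged ≠ [] ∧ PySem.List.pyGet? merged (-1) = some sq then merged else merged ++ [sq]
        if (merged'.length : Int) = n + 1 then merged'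
        else mergeLoop fuel n merged' (si + 1) ci ((si + 1) * (si + 1)) cb
      else
        let merged' := if merged ≠ [] ∧ PySem.List.pyGet? merged (-1) = some cb then merged else merged ++ [cb]
        if (merged'.length : Int) = n + 1 then merged'
        else mergeLoop fuel n merged' si (ci + 1) sq ((ci + 1) * (ci + 1) * (ci + 1))
    else merged

def merging_lists (n : Int) : List Int := mergeLoop (n.toNat + n.toNat) n [] 0 0 0 0

-- ===== PORT B =====
def merging_lists_alt (n : Int) : List Int :=
  let values := (PySem.List.pyRange 0 n 1).foldl
    (fun s i => PySem.Set.add (PySem.Set.add s (i * i)) (i * i * i)) (PySem.Set.empty : PySem.Set Int)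
  PySem.List.slice (PySem.List.sorted values (fun x => x) false) none (some (n + 1))

-- ===== PRECONDITION & SPEC =====
def Spec_merging_lists (n : Int) (out : List Int) : Prop := out = merging_lists_alt n
instance (n : Int) (out : List Int) : Decidable (Spec_merging_lists n out) := by unfold Spec_merging_lists; infer_instance

-- ===== CLAIM (what is proved, stated in full; the proofs are below) =====
def Claim_equal_merging_lists : Prop := ∀ (n : Int), Dom_merging_lists n → Spec_merging_lists n (merging_lists n)

-- ===== LEMMAS AND PROOFS =====

-- the sorted deduplicated list of all squares and cubes with index below n
def pvU (n : Int) : List Int :=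
  PySem.List.sorted ((PySem.List.pyRange 0 n 1).foldl
    (fun s i => PySem.Set.add (PySem.Set.add s (i * i)) (i * i * i)) (PySem.Set.empty : PySem.Set Int))
    (fun x => x) false

-- the values already merged when the pointers stand at (si, ci)
def pvMemS (si ci x : Int) : Prop :=
  (∃ i : Int, 0 ≤ i ∧ i < si ∧ x = i * i) ∨ (∃ j : Int, 0 ≤ j ∧ j < ci ∧ x = j * j * j)

lemma pvAlt_eq (n : Int) : merging_lists_alt n = PySem.List.slice (pvU n) none (some (n + 1)) := rfl

lemma pvSq_le {a b : Int} (ha : 0 ≤ a) (hab : a ≤ b) : a * a ≤ b * b := by nlinarith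
lemma pvCube_le {a b : Int} (ha : 0 ≤ a) (hab : a ≤ b) : a * a * a ≤ b * b * b := by
  nlinarith [mul_nonneg ha ha, mul_nonneg ha (le_trans ha hab), sq_nonneg (a - b), sq_nonneg (a + b)]
lemma pvMem_fold (l : List Int) (s : PySem.Set Int) (y : Int) :
    y ∈ l.foldl (fun s i => PySem.Set.add (PySem.Set.add s (i * i)) (i * i * i)) s ↔
      y ∈ s ∨ ∃ i ∈ l, y = i * i ∨ y = i * i * i := by
  induction l generalizing s with
  | nil => simp
  | cons a t ih =>
    simp [List.foldl_cons, ih, PySem.Set.mem_add]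
    clear ih
    simp [or_assoc]

lemma pvNodup_fold (l : List Int) (s : PySem.Set Int) (hs : s.Nodup) :
    (l.foldl (fun s i => PySem.Set.add (PySem.Set.add s (i * i)) (i * i * i)) s).Nodup := by
  induction l generalizing s with
  | nil => exact hs
  | cons a t ih => exact ih _ (PySem.Set.nodup_add _ _ (PySem.Set.nodup_add _ _ hs))

lemma pvMem_U (n y : Int) : y ∈ pvU n ↔ ∃ i : Int, 0 ≤ i ∧ i < n ∧ (y = i * i ∨ y = i * i * i) := by
  unfold pvU
  rw [PySem.List.mem_sorted, pvMem_fold]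
  simp [PySem.List.mem_pyRange_one]
  constructor
  · rintro ⟨i, ⟨h1, h2⟩, h3⟩; exact ⟨i, h1, h2, h3⟩
  · rintro ⟨i, h1, h2, h3⟩; exact ⟨i, ⟨h1, h2⟩, h3⟩

lemma pvPairwise_U (n : Int) : (pvU n).Pairwise (· < ·) := by
  unfold pvU
  have hnd : (PySem.List.sorted ((PySem.List.pyRange 0 n 1).foldl
      (fun s i => PySem.Set.add (PySem.Set.add s (i * i)) (i * i * i)) (PySem.Set.empty : PySem.Set Int))
      (fun x => x) false).Nodup :=
    (PySem.List.sorted_perm _ _ _).nodup_iff.mpr (pvNodup_fold _ _ (by simp [PySem.Set.empty]))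
  have hle := PySem.List.sorted_pairwise ((PySem.List.pyRange 0 n 1).foldl
      (fun s i => PySem.Set.add (PySem.Set.add s (i * i)) (i * i * i)) (PySem.Set.empty : PySem.Set Int))
      (fun x => x)
  exact (hle.and hnd).imp (fun h => lt_of_le_of_ne h.1 h.2)

-- a strictly increasing sublist whose missing elements all lie above it is a prefix
lemma pvPrefix_of (l u : List Int) (hl : l.Pairwise (· < ·)) (hu : u.Pairwise (· < ·))
    (hsub : ∀ x ∈ l, x ∈ u) (hgap : ∀ x ∈ u, x ∉ l → ∀ y ∈ l, y < x) : l <+: u := by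
  induction l generalizing u with
  | nil => exact List.nil_prefix
  | cons a t ih =>
    have hau : a ∈ u := hsub a (List.mem_cons_self ..)
    obtain ⟨b, u', rfl⟩ : ∃ b u', u = b :: u' := by
      cases u with
      | nil => simp at hau
      | cons b u' => exact ⟨b, u', rfl⟩
    have hab : a = b := by
      by_contra hne
      rcases List.mem_cons.mp hau with h | h
      · exact hne h
      · have hba : b < a := (List.pairwise_cons.mp hu).1 a h
        by_cases hbl : b ∈ a :: t
        · rcases List.mem_cons.mp hbl with h' | h'
          · omega
          · have := (List.pairwise_cons.mp hl).1 b h'; omega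
        · have := hgap b (List.mem_cons_self ..) hbl a (List.mem_cons_self ..); omega
    subst hab
    have hpt : t <+: u' := by
      refine ih u' (List.pairwise_cons.mp hl).2 (List.pairwise_cons.mp hu).2 ?_ ?_
      · intro x hx
        have hxu : x ∈ a :: u' := hsub x (List.mem_cons_of_mem _ hx)
        rcases List.mem_cons.mp hxu with h | h
        · have := (List.pairwise_cons.mp hl).1 x hx; omega
        · exact h
      · intro x hx hxt y hy
        by_cases hxl : x ∈ a :: t
        · rcases List.mem_cons.mp hxl with h | h
          · subst h
            have := (List.pairwise_cons.mp hu).1 x hx; omega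
          · exact absurd h hxt
        · exact hgap x (List.mem_cons_of_mem _ hx) hxl y (List.mem_cons_of_mem _ hy)
    exact List.cons_prefix_cons.mpr ⟨rfl, hpt⟩
  
-- in a strictly increasing list bounded by v, v (if present) is the last element
lemma pvLast_of (l : List Int) (v : Int) (hl : l.Pairwise (· < ·)) (hb : ∀ x ∈ l, x ≤ v)
    (hv : v ∈ l) : l.getLast? = some v := by
  induction l with
  | nil => simp at hv
  | cons a t ih =>
    cases t with
    | nil => simp at hv ⊢; omega
    | cons b t' =>
      rw [List.getLast?_cons_cons]
      apply ih (List.pairwise_cons.mp hl).2 (fun x hx => hb x (List.mem_cons_of_mem _ hx))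
      rcases List.mem_cons.mp hv with h | h
      · exfalso
        have h1 := (List.pairwise_cons.mp hl).1 b (List.mem_cons_self ..)
        have h2 := hb b (List.mem_cons_of_mem _ (List.mem_cons_self ..))
        omega
      · exact h

-- the already-merged values all lie strictly below every not-yet-merged square/cube
lemma pvGap (n si ci : Int) (acc : List Int)
    (hsi0 : 0 ≤ si) (hci0 : 0 ≤ ci)
    (hmem : ∀ x, x ∈ acc ↔ pvMemS si ci x)
    (hbS : si < n → ∀ x ∈ acc, x ≤ si * si)
    (hbC : ci < n → ∀ x ∈ acc, x ≤ ci * ci * ci) :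
    ∀ x ∈ pvU n, x ∉ acc → ∀ y ∈ acc, y < x := by
  intro x hxU hxacc y hy
  obtain ⟨i, hi0, hin, hx⟩ := (pvMem_U n x).mp hxU
  have hyx : y ≠ x := fun h => hxacc (h ▸ hy)
  have hxS := fun h => hxacc ((hmem x).mpr h)
  rcases hx with hx | hx
  · have hsi_le : si ≤ i := by
      by_contra h
      exact hxS (Or.inl ⟨i, hi0, by omega, hx⟩)
    have hsn : si < n := by omega
    have h1 := hbS hsn y hy
    have h2 := pvSq_le hsi0 hsi_le
    omega
  · have hci_le : ci ≤ i := by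
      by_contra h
      exact hxS (Or.inr ⟨i, hi0, by omega, hx⟩)
    have hcn : ci < n := by omega
    have h1 := hbC hcn y hy
    have h2 := pvCube_le hci0 hci_le
    omega

lemma pvMemS_succ_sq (si ci x : Int) (h : 0 ≤ si) :
    pvMemS (si + 1) ci x ↔ pvMemS si ci x ∨ x = si * si := by
  unfold pvMemS
  constructor
  · rintro (⟨i, h1, h2, h3⟩ | h3)
    · rcases lt_or_ge i si with h4 | h4
      · exact Or.inl (Or.inl ⟨i, h1, h4, h3⟩)
      · have : i = si := by omega
        subst this; exact Or.inr h3
    · exact Or.inl (Or.inr h3)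
  · rintro ((⟨i, h1, h2, h3⟩ | h3) | h3)
    · exact Or.inl ⟨i, h1, by omega, h3⟩
    · exact Or.inr h3
    · exact Or.inl ⟨si, h, by omega, h3⟩

lemma pvMemS_succ_cb (si ci x : Int) (h : 0 ≤ ci) :
    pvMemS si (ci + 1) x ↔ pvMemS si ci x ∨ x = ci * ci * ci := by
  unfold pvMemS
  constructor
  · rintro (h3 | ⟨j, h1, h2, h3⟩)
    · exact Or.inl (Or.inl h3)
    · rcases lt_or_ge j ci with h4 | h4
      · exact Or.inl (Or.inr ⟨j, h1, h4, h3⟩)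
      · have : j = ci := by omega
        subst this; exact Or.inr h3
  · rintro ((h3 | ⟨j, h1, h2, h3⟩) | h3)
    · exact Or.inl h3
    · exact Or.inr ⟨j, h1, by omega, h3⟩
    · exact Or.inr ⟨ci, h, by omega, h3⟩

lemma pvMemS_sub_U (n si ci x : Int) (hsin : si ≤ n) (hcin : ci ≤ n)
    (h : pvMemS si ci x) : x ∈ pvU n := by
  rw [pvMem_U]
  rcases h with ⟨i, h1, h2, h3⟩ | ⟨j, h1, h2, h3⟩
  · exact ⟨i, h1, by omega, Or.inl h3⟩
  · exact ⟨j, h1, by omega, Or.inr h3⟩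

lemma pvPrefix_U (n si ci : Int) (acc : List Int)
    (hsi0 : 0 ≤ si) (hsin : si ≤ n) (hci0 : 0 ≤ ci) (hcin : ci ≤ n)
    (hpw : acc.Pairwise (· < ·))
    (hmem : ∀ x, x ∈ acc ↔ pvMemS si ci x)
    (hbS : si < n → ∀ x ∈ acc, x ≤ si * si)
    (hbC : ci < n → ∀ x ∈ acc, x ≤ ci * ci * ci) : acc <+: pvU n := by
  apply pvPrefix_of acc (pvU n) hpw (pvPairwise_U n)
  · exact fun x hx => pvMemS_sub_U n si ci x hsin hcin ((hmem x).mp hx)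
  · intro x hxU hxacc
    exact pvGap n si ci acc hsi0 hci0 hmem hbS hbC x hxU (fun h => hxacc h)

-- an accumulator that has reached length n+1 is exactly the first n+1 sorted values
lemma pvBreak (n si ci : Int) (acc : List Int)
    (hsi0 : 0 ≤ si) (hsin : si ≤ n) (hci0 : 0 ≤ ci) (hcin : ci ≤ n)
    (hpw : acc.Pairwise (· < ·))
    (hmem : ∀ x, x ∈ acc ↔ pvMemS si ci x)
    (hbS : si < n → ∀ x ∈ acc, x ≤ si * si)
    (hbC : ci < n → ∀ x ∈ acc, x ≤ ci * ci * ci)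
    (hlen : (acc.length : Int) = n + 1) : acc = (pvU n).take (n + 1).toNat := by
  have hp := pvPrefix_U n si ci acc hsi0 hsin hci0 hcin hpw hmem hbS hbC
  have h1 : acc.length = (n + 1).toNat := by omega
  rw [List.prefix_iff_eq_take.mp hp, h1]

-- when both pointers have reached n the accumulator is the whole sorted union
lemma pvFinal (n : Int) (acc : List Int) (hn0 : 0 ≤ n)
    (hpw : acc.Pairwise (· < ·))
    (hmem : ∀ x, x ∈ acc ↔ pvMemS n n x)
    (hlen : (acc.length : Int) ≤ n) : acc = (pvU n).take (n + 1).toNat := by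
  have h1 : acc <+: pvU n :=
    pvPrefix_U n n n acc hn0 le_rfl hn0 le_rfl hpw hmem
      (fun h => absurd h (lt_irrefl n)) (fun h => absurd h (lt_irrefl n))
  have h2 : pvU n <+: acc := by
    apply pvPrefix_of (pvU n) acc (pvPairwise_U n) hpw
    · intro x hx
      rw [pvMem_U] at hx
      obtain ⟨i, hi0, hin, hi⟩ := hx
      apply (hmem x).mpr
      rcases hi with hi | hi
      · exact Or.inl ⟨i, hi0, hin, hi⟩
      · exact Or.inr ⟨i, hi0, hin, hi⟩
    · intro x hx hxU
      exact absurd (pvMemS_sub_U n n n x le_rfl le_rfl ((hmem x).mp hx)) hxU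
  have heq : acc = pvU n := h1.eq_of_length (le_antisymm h1.length_le h2.length_le)
  rw [← heq, List.take_of_length_le (by omega)]

lemma pvMergeLoop_eq (n : Int) (k : Nat) : ∀ (si ci : Int) (acc : List Int),
    (n - si).toNat + (n - ci).toNat ≤ k →
    0 ≤ si → si ≤ n → 0 ≤ ci → ci ≤ n →
    acc.Pairwise (· < ·) →
    (∀ x, x ∈ acc ↔ pvMemS si ci x) →
    (si < n → ∀ x ∈ acc, x ≤ si * si) →
    (ci < n → ∀ x ∈ acc, x ≤ ci * ci * ci) →
    (acc.length : Int) ≤ n →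
    mergeLoop k n acc si ci (si * si) (ci * ci * ci) = (pvU n).take (n + 1).toNat := by
  induction k with
  | zero =>
    intro si ci acc hk hsi0 hsin hci0 hcin hpw hmem hbS hbC hlen
    have hsi : si = n := by omega
    have hci : ci = n := by omega
    rw [hsi, hci] at hmem
    exact pvFinal n acc (by omega) hpw hmem hlen
  | succ k ih =>
    intro si ci acc hk hsi0 hsin hci0 hcin hpw hmem hbS hbC hlen
    rw [mergeLoop]
    by_cases hg : si < n ∨ ci < n
    · rw [if_pos hg]
      by_cases hc : ci = n ∨ (si < n ∧ si * si ≤ ci * ci * ci)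
      · -- square branch
        rw [if_pos hc]
        have hsn : si < n := by
          rcases hc with hc | hc
          · rcases hg with hg | hg
            · exact hg
            · omega
          · exact hc.1
        have hiff : (acc ≠ [] ∧ PySem.List.pyGet? acc (-1) = some (si * si)) ↔ si * si ∈ acc := by
          rw [PySem.List.pyGet?_neg_one]
          constructor
          · rintro ⟨-, h2⟩; exact List.mem_of_getLast? h2
          · intro h
            exact ⟨List.ne_nil_of_mem h, pvLast_of acc (si * si) hpw (hbS hsn) h⟩
        -- the new accumulator and its invariants at (si + 1, ci)
        by_cases hin : si * si ∈ acc
        · rw [if_pos (hiff.mpr hin)]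
          have hmem' : ∀ x, x ∈ acc ↔ pvMemS (si + 1) ci x := by
            intro x
            rw [pvMemS_succ_sq _ _ _ hsi0, ← hmem]
            constructor
            · exact Or.inl
            · rintro (h | h)
              · exact h
              · exact h ▸ hin
          have hbS' : si + 1 < n → ∀ x ∈ acc, x ≤ (si + 1) * (si + 1) := by
            intro _ x hx
            have h1 := hbS hsn x hx
            have h2 := pvSq_le hsi0 (by omega : si ≤ si + 1)
            omega
          rw [if_neg (by omega)]
          exact ih (si + 1) ci acc (by omega) (by omega) (by omega) hci0 hcin hpw hmem' hbS' hbC hlen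
        · rw [if_neg (fun h => hin (hiff.mp h))]
          have hmem' : ∀ x, x ∈ acc ++ [si * si] ↔ pvMemS (si + 1) ci x := by
            intro x
            rw [pvMemS_succ_sq _ _ _ hsi0, List.mem_append, List.mem_singleton, hmem]
          have hpw' : (acc ++ [si * si]).Pairwise (· < ·) := by
            rw [List.pairwise_append]
            refine ⟨hpw, List.pairwise_singleton _ _, ?_⟩
            intro y hy z hz
            rw [List.mem_singleton] at hz
            subst hz
            have h1 := hbS hsn y hy
            have h2 : y ≠ si * si := fun h => hin (h ▸ hy)
            omega
          have hbS' : si + 1 < n → ∀ x ∈ acc ++ [si * si], x ≤ (si + 1) * (si + 1) := by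
            intro _ x hx
            have h2 := pvSq_le hsi0 (by omega : si ≤ si + 1)
            rcases List.mem_append.mp hx with hx | hx
            · have h1 := hbS hsn x hx; omega
            · rw [List.mem_singleton] at hx; omega
          have hbC' : ci < n → ∀ x ∈ acc ++ [si * si], x ≤ ci * ci * ci := by
            intro hcn x hx
            rcases List.mem_append.mp hx with hx | hx
            · exact hbC hcn x hx
            · rw [List.mem_singleton] at hx
              subst hx
              rcases hc with hc | hc
              · omega
              · exact hc.2
          by_cases hbrk : ((acc ++ [si * si]).length : Int) = n + 1
          · rw [if_pos hbrk]
            exact pvBreak n (si + 1) ci _ (by omega) (by omega) hci0 hcin hpw' hmem' hbS' hbC' hbrk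
          · rw [if_neg hbrk]
            have hlen' : ((acc ++ [si * si]).length : Int) ≤ n := by
              simp only [List.length_append, List.length_singleton] at hbrk ⊢
              push_cast at hbrk ⊢
              omega
            exact ih (si + 1) ci _ (by omega) (by omega) (by omega) hci0 hcin hpw' hmem' hbS' hbC' hlen'
      · -- cube branch
        rw [if_neg hc]
        have hcn : ci < n := by
          rcases not_or.mp hc with ⟨h1, -⟩
          omega
        have hsq : si < n → ci * ci * ci < si * si := by
          intro h
          rcases not_or.mp hc with ⟨-, h2⟩
          rcases not_and_or.mp h2 with h3 | h3
          · exact absurd h h3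
          · omega
        have hiff : (acc ≠ [] ∧ PySem.List.pyGet? acc (-1) = some (ci * ci * ci)) ↔ ci * ci * ci ∈ acc := by
          rw [PySem.List.pyGet?_neg_one]
          constructor
          · rintro ⟨-, h2⟩; exact List.mem_of_getLast? h2
          · intro h
            exact ⟨List.ne_nil_of_mem h, pvLast_of acc (ci * ci * ci) hpw (hbC hcn) h⟩
        by_cases hin : ci * ci * ci ∈ acc
        · rw [if_pos (hiff.mpr hin)]
          have hmem' : ∀ x, x ∈ acc ↔ pvMemS si (ci + 1) x := by
            intro x
            rw [pvMemS_succ_cb _ _ _ hci0, ← hmem]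
            constructor
            · exact Or.inl
            · rintro (h | h)
              · exact h
              · exact h ▸ hin
          have hbC' : ci + 1 < n → ∀ x ∈ acc, x ≤ (ci + 1) * (ci + 1) * (ci + 1) := by
            intro _ x hx
            have h1 := hbC hcn x hx
            have h2 := pvCube_le hci0 (by omega : ci ≤ ci + 1)
            omega
          rw [if_neg (by omega)]
          exact ih si (ci + 1) acc (by omega) hsi0 hsin (by omega) (by omega) hpw hmem' hbS hbC' hlen
        · rw [if_neg (fun h => hin (hiff.mp h))]
          have hmem' : ∀ x, x ∈ acc ++ [ci * ci * ci] ↔ pvMemS si (ci + 1) x := by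
            intro x
            rw [pvMemS_succ_cb _ _ _ hci0, List.mem_append, List.mem_singleton, hmem]
          have hpw' : (acc ++ [ci * ci * ci]).Pairwise (· < ·) := by
            rw [List.pairwise_append]
            refine ⟨hpw, List.pairwise_singleton _ _, ?_⟩
            intro y hy z hz
            rw [List.mem_singleton] at hz
            subst hz
            have h1 := hbC hcn y hy
            have h2 : y ≠ ci * ci * ci := fun h => hin (h ▸ hy)
            omega
          have hbC' : ci + 1 < n → ∀ x ∈ acc ++ [ci * ci * ci], x ≤ (ci + 1) * (ci + 1) * (ci + 1) := by
            intro _ x hx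
            have h2 := pvCube_le hci0 (by omega : ci ≤ ci + 1)
            rcases List.mem_append.mp hx with hx | hx
            · have h1 := hbC hcn x hx; omega
            · rw [List.mem_singleton] at hx; omega
          have hbS' : si < n → ∀ x ∈ acc ++ [ci * ci * ci], x ≤ si * si := by
            intro hsn x hx
            rcases List.mem_append.mp hx with hx | hx
            · exact hbS hsn x hx
            · rw [List.mem_singleton] at hx
              have := hsq hsn
              omega
          by_cases hbrk : ((acc ++ [ci * ci * ci]).length : Int) = n + 1
          · rw [if_pos hbrk]
            exact pvBreak n si (ci + 1) _ hsi0 hsin (by omega) (by omega) hpw' hmem' hbS' hbC' hbrk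
          · rw [if_neg hbrk]
            have hlen' : ((acc ++ [ci * ci * ci]).length : Int) ≤ n := by
              simp only [List.length_append, List.length_singleton] at hbrk ⊢
              push_cast at hbrk ⊢
              omega
            exact ih si (ci + 1) _ (by omega) hsi0 hsin (by omega) (by omega) hpw' hmem' hbS' hbC' hlen'
    · rw [if_neg hg]
      have hsi : si = n := by omega
      have hci : ci = n := by omega
      rw [hsi, hci] at hmem
      exact pvFinal n acc (by omega) hpw hmem hlen

-- ===== VERDICT (by name: the statement is the Claim_ definition above) =====
theorem merging_lists_spec : Claim_equal_merging_lists := by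
  intro n _
  unfold Spec_merging_lists
  rw [pvAlt_eq]
  by_cases hn : 0 < n
  · have h0 : merging_lists n = mergeLoop (n.toNat + n.toNat) n [] 0 0 (0 * 0) (0 * 0 * 0) := by
      norm_num [merging_lists]
    rw [h0, PySem.List.slice_to _ (by omega)]
    apply pvMergeLoop_eq n (n.toNat + n.toNat) 0 0 []
    · omega
    · omega
    · omega
    · omega
    · omega
    · exact List.Pairwise.nil
    · intro x
      simp only [List.not_mem_nil, false_iff]
      rintro (⟨i, h1, h2, -⟩ | ⟨j, h1, h2, -⟩) <;> omega
    · intro _ x hx; simp at hx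
    · intro _ x hx; simp at hx
    · simp; omega
  · have hU : pvU n = [] := by
      unfold pvU
      rw [PySem.List.pyRange_one_eq_nil (by omega)]
      rfl
    have hA : merging_lists n = [] := by
      unfold merging_lists
      cases h : n.toNat + n.toNat with
      | zero => rw [mergeLoop]
      | succ m => rw [mergeLoop, if_neg (by omega)]
    rw [hA, hU]
    simp [PySem.List.slice]
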